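-- pv_equiv track=rewrite | github.com/JonathasSC/pycine | src/views/client_view.py | create_seat_matrix
-- ===== SOURCE A (Python) =====
-- def create_seat_matrix(seats):
--     max_row = max(seat[3] for seat in seats) + 1
--     max_col = max(seat[4] for seat in seats) + 1
--
--     seat_matrix = [['' for _ in range(max_col)] for _ in range(max_row)]
--
--     for seat in seats:
--         row = seat[3]
--         col = seat[4]
--         state = seat[5]
--         seat_code = seat[2]
--
--         match state:
--             case 'available':
--                 color_code = '\033[92m'
--             case 'reserved':
--                 color_code = '\033[93m'
--             case 'sold':
--                 color_code = '\033[91m'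
--             case _:
--                 color_code = '\033[0m'
--
--         seat_matrix[row][col] = f"{color_code}[{seat_code}]\033[0m"
--
--     return seat_matrix
-- ===== SOURCE B (Python) =====
-- def create_seat_matrix(seats):
--     max_row = max(seat[3] for seat in seats) + 1
--     max_col = max(seat[4] for seat in seats) + 1
--     palette = {'available': '\033[92m', 'reserved': '\033[93m', 'sold': '\033[91m'}
--
--     def build_row(r):
--         row_seats = [s for s in reversed(seats) if s[3] == r]
--
--         def cell(c):
--             for s in row_seats:
--                 if s[4] == c:
--                     return f"{palette.get(s[5], chr(27) + '[0m')}[{s[2]}]\033[0m"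
--             return ''
--
--         return [cell(c) for c in range(max_col)]
--
--     return [build_row(r) for r in range(max_row)]
-- ===== Notes on version B (the rewrite author's own statement) =====
-- stated objective: alternative
-- what changed: Replaces A's allocate-then-scatter (mutable blank matrix written per seat, with Python negative-index wraparound) by a pure staged gather: for each row the reversed seat list is filtered once, then each cell is found by a linear search of that row's seats for the first (i.e. latest) match, with no pre-allocated grid and no index structure.
-- intended difference: On seat lists containing a seat with a negative row or column index that is still in wraparound range, A silently places that seat at the mirrored position counted from the end of the matrix (an artefact of Python negative indexing), while B leaves such out-of-grid seats out of the matrix, which is the intended reading of coordinates as grid positions. — e.g. on create_seat_matrix([(0, 0, "A", 1, 0, "available"), (0, 0, "B", -1, 0, "sold")]): A returns [[""], ["\x1b[91m[B]\x1b[0m"]], B returns [[""], ["\x1b[92m[A]\x1b[0m"]]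
import Mathlib
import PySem

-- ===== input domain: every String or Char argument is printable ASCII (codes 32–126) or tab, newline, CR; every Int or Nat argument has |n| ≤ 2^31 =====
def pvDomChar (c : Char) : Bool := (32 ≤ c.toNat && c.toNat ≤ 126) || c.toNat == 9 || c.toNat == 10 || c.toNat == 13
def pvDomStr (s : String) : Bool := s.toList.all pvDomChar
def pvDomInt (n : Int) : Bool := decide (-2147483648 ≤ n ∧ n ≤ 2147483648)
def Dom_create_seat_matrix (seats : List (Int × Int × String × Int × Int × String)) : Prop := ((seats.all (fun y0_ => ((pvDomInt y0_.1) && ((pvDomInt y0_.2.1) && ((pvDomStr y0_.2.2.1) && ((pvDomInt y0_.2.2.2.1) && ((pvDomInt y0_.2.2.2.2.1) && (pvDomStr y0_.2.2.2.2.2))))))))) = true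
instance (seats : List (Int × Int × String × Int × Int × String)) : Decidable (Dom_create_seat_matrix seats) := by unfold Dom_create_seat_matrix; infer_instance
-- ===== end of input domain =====

-- B replaces A's allocate-then-scatter (mutable blank grid written per seat) by a pure per-cell
-- gather: each output cell is found by a reverse linear search of the seat list; alternative, not faster.

-- Python max(...) over a nonempty iterable (dummy 0 on [], where Python raises ValueError — outside Pre_)
def pvPyMax (xs : List Int) : Int :=
  match xs with
  | [] => 0
  | h :: t => t.foldl max h

-- ===== PORT A =====
def create_seat_matrix (seats : List (Int × Int × String × Int × Int × String)) : List (List String) :=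
  let max_row : Int := pvPyMax (seats.map (fun s => s.2.2.2.1)) + 1
  let max_col : Int := pvPyMax (seats.map (fun s => s.2.2.2.2.1)) + 1
  let init : List (List String) := List.replicate max_row.toNat (List.replicate max_col.toNat "")
  seats.foldl (fun m s =>
    let row := s.2.2.2.1
    let col := s.2.2.2.2.1
    let state := s.2.2.2.2.2
    let code := s.2.2.1
    let color :=
      if state = "available" then "\x1b[92m"
      else if state = "reserved" then "\x1b[93m"
      else if state = "sold" then "\x1b[91m"
      else "\x1b[0m"
    -- seat_matrix[row][col] = … : Python negative-index semantics via pySetD/pyGetD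
    PySem.List.pySetD m row
      (PySem.List.pySetD (PySem.List.pyGetD m row []) col
        (color ++ "[" ++ code ++ "]" ++ "\x1b[0m"))) init

-- ===== PORT B =====
def pvPalette : PySem.Dict String String :=
  PySem.Dict.ofList [("available", "\x1b[92m"), ("reserved", "\x1b[93m"), ("sold", "\x1b[91m")]

-- Source B's cell(c): first match scanning the row's pre-filtered seats; '' if none
def pvCellOfRow (row_seats : List (Int × Int × String × Int × Int × String)) (c : Int) : String :=
  match row_seats.find? (fun s => s.2.2.2.2.1 == c) with
  | some s => pvPalette.getD s.2.2.2.2.2 "\x1b[0m" ++ "[" ++ s.2.2.1 ++ "]" ++ "\x1b[0m"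
  | none => ""

-- Source B's build_row(r): filter reversed(seats) to this row once, then gather its cells
def pvBuildRow (seats : List (Int × Int × String × Int × Int × String)) (max_col r : Int) : List String :=
  let row_seats := seats.reverse.filter (fun s => s.2.2.2.1 == r)
  (PySem.List.pyRange 0 max_col 1).map (fun c => pvCellOfRow row_seats c)

def create_seat_matrix_alt (seats : List (Int × Int × String × Int × Int × String)) : List (List String) :=
  let max_row : Int := pvPyMax (seats.map (fun s => s.2.2.2.1)) + 1
  let max_col : Int := pvPyMax (seats.map (fun s => s.2.2.2.2.1)) + 1
  (PySem.List.pyRange 0 max_row 1).map (fun r => pvBuildRow seats max_col r)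

-- ===== PRECONDITION & SPEC =====
-- Pre_ excludes exactly the inputs on which A raises: the empty list (max() raises ValueError)
-- and lists where some seat's negative row/column is below Python's wraparound range (IndexError).
def Pre_create_seat_matrix (seats : List (Int × Int × String × Int × Int × String)) : Prop :=
  seats ≠ [] ∧ ∀ s ∈ seats,
    0 ≤ s.2.2.2.1 + (pvPyMax (seats.map (fun t => t.2.2.2.1)) + 1) ∧
    0 ≤ s.2.2.2.2.1 + (pvPyMax (seats.map (fun t => t.2.2.2.2.1)) + 1)
instance (seats : List (Int × Int × String × Int × Int × String)) : Decidable (Pre_create_seat_matrix seats) := by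
  unfold Pre_create_seat_matrix; infer_instance

def pvWitness_create_seat_matrix : (List (Int × Int × String × Int × Int × String)) :=
  [(1, 1, "A1", 0, 0, "available")]

-- On seats with a negative row or column still in Python wraparound range, A silently places the
-- seat at the mirrored position from the end of the matrix; B leaves such out-of-grid seats out,
-- the intended reading of coordinates as grid positions.
def D_create_seat_matrix (seats : List (Int × Int × String × Int × Int × String)) : Prop :=
  ∃ s ∈ seats, s.2.2.2.1 < 0 ∨ s.2.2.2.2.1 < 0
instance (seats : List (Int × Int × String × Int × Int × String)) : Decidable (D_create_seat_matrix seats) := by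
  unfold D_create_seat_matrix; infer_instance

def Spec_create_seat_matrix (seats : List (Int × Int × String × Int × Int × String)) (out : List (List String)) : Prop :=
  ¬ D_create_seat_matrix seats → out = create_seat_matrix_alt seats
instance (seats : List (Int × Int × String × Int × Int × String)) (out : List (List String)) : Decidable (Spec_create_seat_matrix seats out) := by
  unfold Spec_create_seat_matrix; infer_instance

def pvDiffWitness_create_seat_matrix : (List (Int × Int × String × Int × Int × String)) :=
  [(0, 0, "A", 1, 0, "available"), (0, 0, "B", -1, 0, "sold")]

def pvDiffWitnessOut_create_seat_matrix : (List (List String)) × (List (List String)) :=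
  ([[""], ["\x1b[91m[B]\x1b[0m"]], [[""], ["\x1b[92m[A]\x1b[0m"]])

-- ===== CLAIM =====
def Claim_unchanged_create_seat_matrix : Prop := ∀ (seats : List (Int × Int × String × Int × Int × String)), Dom_create_seat_matrix seats → Pre_create_seat_matrix seats → Spec_create_seat_matrix seats (create_seat_matrix seats)
def Claim_changed_create_seat_matrix : Prop := Dom_create_seat_matrix (pvDiffWitness_create_seat_matrix) ∧ Pre_create_seat_matrix (pvDiffWitness_create_seat_matrix) ∧ D_create_seat_matrix (pvDiffWitness_create_seat_matrix) ∧ create_seat_matrix (pvDiffWitness_create_seat_matrix) = pvDiffWitnessOut_create_seat_matrix.1 ∧ create_seat_matrix_alt (pvDiffWitness_create_seat_matrix) = pvDiffWitnessOut_create_seat_matrix.2 ∧ pvDiffWitnessOut_create_seat_matrix.1 ≠ pvDiffWitnessOut_create_seat_matrix.2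

-- ===== LEMMAS AND PROOFS =====

-- the grid built by mapping f over the coordinate ranges (proof-only helper)
def pvGrid (R C : Int) (f : Int → Int → String) : List (List String) :=
  (PySem.List.pyRange 0 R 1).map fun r => (PySem.List.pyRange 0 C 1).map fun c => f r c

lemma pv_foldl_max_le (l : List Int) (a : Int) : a ≤ l.foldl max a := by
  induction l generalizing a with
  | nil => exact le_refl a
  | cons h t ih => exact le_trans (le_max_left a h) (ih (max a h))

lemma pv_le_foldl_max (l : List Int) (a : Int) {x : Int} (hx : x ∈ l) : x ≤ l.foldl max a := by
  induction l generalizing a with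
  | nil => cases hx
  | cons h t ih =>
    rcases List.mem_cons.mp hx with rfl | hm
    · exact le_trans (le_max_right a x) (pv_foldl_max_le t (max a x))
    · exact ih (max a h) hm

lemma pv_le_pyMax {x : Int} {xs : List Int} (h : x ∈ xs) : x ≤ pvPyMax xs := by
  cases xs with
  | nil => cases h
  | cons a t =>
    rcases List.mem_cons.mp h with rfl | hm
    · exact pv_foldl_max_le t x
    · exact pv_le_foldl_max t a hm

lemma pv_set_map_pyRange {α : Type} (R r : Int) (g : Int → α) (w : α)
    (h0 : 0 ≤ r) (h1 : r < R) :
    ((PySem.List.pyRange 0 R 1).map g).set r.toNat w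
      = (PySem.List.pyRange 0 R 1).map fun x => if x = r then w else g x := by
  apply List.ext_getElem (by simp)
  intro i hi hi'
  have hlen : (i : Int) < R := by
    have := hi'
    simp [PySem.List.length_pyRange_one] at this
    omega
  rw [List.getElem_set, List.getElem_map, List.getElem_map, PySem.List.getElem_pyRange_one]
  by_cases h : 0 + (i : Int) = r
  · have ht : r.toNat = i := by omega
    have h' : (i : Int) = r := by omega
    simp [ht, h']
  · have ht : ¬ r.toNat = i := by omega
    have h' : ¬ ((i : Int) = r) := by omega
    simp [ht, h']

lemma pv_step_grid (R C r c : Int) (f : Int → Int → String) (v : String)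
    (hr0 : 0 ≤ r) (hrR : r < R) (hc0 : 0 ≤ c) (hcC : c < C) :
    PySem.List.pySetD (pvGrid R C f) r
      (PySem.List.pySetD (PySem.List.pyGetD (pvGrid R C f) r []) c v)
    = pvGrid R C (fun x y => if x = r ∧ y = c then v else f x y) := by
  unfold pvGrid
  rw [PySem.List.pyGetD_map_pyRange_of_nonneg _ _ _ _ hr0 hrR]
  rw [PySem.List.pySetD_of_nonneg _ _ hc0, PySem.List.pySetD_of_nonneg _ _ hr0]
  rw [pv_set_map_pyRange C c _ v hc0 hcC, pv_set_map_pyRange R r _ _ hr0 hrR]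
  apply List.map_congr_left
  intro x _
  by_cases hx : x = r
  · subst hx
    rw [if_pos rfl]
    apply List.map_congr_left
    intro y _
    by_cases hy : y = c <;> simp [hy]
  · simp only [if_neg hx]
    apply List.map_congr_left
    intro y _
    simp [hx]

lemma pv_palette_insert :
    pvPalette = ((PySem.Dict.empty.insert "available" "\x1b[92m").insert "reserved" "\x1b[93m").insert "sold" "\x1b[91m" := by
  decide

lemma pv_color_eq (st : String) :
    pvPalette.getD st "\x1b[0m"
      = (if st = "available" then "\x1b[92m"
         else if st = "reserved" then "\x1b[93m"
         else if st = "sold" then "\x1b[91m"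
         else "\x1b[0m") := by
  by_cases h1 : st = "available"
  · subst h1; decide
  · by_cases h2 : st = "reserved"
    · subst h2; decide
    · by_cases h3 : st = "sold"
      · subst h3; decide
      · simp only [if_neg h1, if_neg h2, if_neg h3]
        rw [pv_palette_insert]
        simp [PySem.Dict.getD_insert, PySem.Dict.getD_empty, h1, h2, h3]

-- scatter over a seat list equals the gather grid whose cell is the last matching seat
lemma pv_scatter_gather (R C : Int) (seats : List (Int × Int × String × Int × Int × String))
    (f0 : Int → Int → String)
    (H : ∀ s ∈ seats, 0 ≤ s.2.2.2.1 ∧ s.2.2.2.1 < R ∧ 0 ≤ s.2.2.2.2.1 ∧ s.2.2.2.2.1 < C) :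
    seats.foldl (fun m s =>
      PySem.List.pySetD m s.2.2.2.1
        (PySem.List.pySetD (PySem.List.pyGetD m s.2.2.2.1 []) s.2.2.2.2.1
          ((if s.2.2.2.2.2 = "available" then "\x1b[92m"
            else if s.2.2.2.2.2 = "reserved" then "\x1b[93m"
            else if s.2.2.2.2.2 = "sold" then "\x1b[91m"
            else "\x1b[0m") ++ "[" ++ s.2.2.1 ++ "]" ++ "\x1b[0m")))
      (pvGrid R C f0)
    = pvGrid R C (fun r c =>
        match seats.reverse.find? (fun s => s.2.2.2.1 == r && s.2.2.2.2.1 == c) with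
        | some s => pvPalette.getD s.2.2.2.2.2 "\x1b[0m" ++ "[" ++ s.2.2.1 ++ "]" ++ "\x1b[0m"
        | none => f0 r c) := by
  induction seats using List.reverseRecOn generalizing f0 with
  | nil => simp [pvGrid]
  | append_singleton t s ih =>
    rw [List.foldl_append]
    have Ht : ∀ s' ∈ t, 0 ≤ s'.2.2.2.1 ∧ s'.2.2.2.1 < R ∧ 0 ≤ s'.2.2.2.2.1 ∧ s'.2.2.2.2.1 < C := by
      intro s' hs'; exact H s' (List.mem_append_left _ hs')
    obtain ⟨hr0, hrR, hc0, hcC⟩ := H s (List.mem_append_right _ (List.mem_singleton_self s))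
    rw [ih f0 Ht, List.foldl_cons, List.foldl_nil,
      pv_step_grid R C s.2.2.2.1 s.2.2.2.2.1 _ _ hr0 hrR hc0 hcC]
    unfold pvGrid
    apply List.map_congr_left
    intro r _
    apply List.map_congr_left
    intro c _
    beta_reduce
    rw [List.reverse_append, List.reverse_singleton, List.singleton_append, List.find?_cons]
    by_cases hm : r = s.2.2.2.1 ∧ c = s.2.2.2.2.1
    · have hb : (s.2.2.2.1 == r && s.2.2.2.2.1 == c) = true := by
        simp [hm.1, hm.2]
      rw [if_pos hm, hb]
      show _ = pvPalette.getD s.2.2.2.2.2 "\x1b[0m" ++ "[" ++ s.2.2.1 ++ "]" ++ "\x1b[0m"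
      rw [pv_color_eq]
    · have hb : (s.2.2.2.1 == r && s.2.2.2.2.1 == c) = false := by
        rcases not_and_or.mp hm with h | h
        · have h' : ¬ s.2.2.2.1 = r := fun e => h e.symm
          simp [h']
        · have h' : ¬ s.2.2.2.2.1 = c := fun e => h e.symm
          simp [h']
      rw [if_neg hm, hb]

lemma pv_find?_filter {α : Type} (l : List α) (q p : α → Bool) :
    (l.filter q).find? p = l.find? (fun a => q a && p a) := by
  induction l with
  | nil => rfl
  | cons a t ih =>
    by_cases hq : q a = true
    · rw [List.filter_cons_of_pos hq, List.find?_cons, List.find?_cons]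
      by_cases hp : p a = true
      · simp [hq, hp]
      · simp only [Bool.not_eq_true] at hp
        simp [hq, hp, ih]
    · simp only [Bool.not_eq_true] at hq
      rw [List.filter_cons_of_neg (by simp [hq]), List.find?_cons]
      simp [hq, ih]

lemma pv_init_grid (R C : Int) :
    List.replicate R.toNat (List.replicate C.toNat ("" : String))
      = pvGrid R C (fun _ _ => "") := by
  unfold pvGrid
  simp [PySem.List.pyRange_one, Function.comp_def, List.map_const', List.length_range]

-- ===== VERDICT =====
theorem create_seat_matrix_spec : Claim_unchanged_create_seat_matrix := by
  intro seats hdom hpre hnd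
  have hpos : ∀ s ∈ seats, 0 ≤ s.2.2.2.1 ∧ 0 ≤ s.2.2.2.2.1 := by
    intro s hs
    by_contra hc
    exact hnd ⟨s, hs, by omega⟩
  have H : ∀ s ∈ seats,
      0 ≤ s.2.2.2.1 ∧ s.2.2.2.1 < pvPyMax (seats.map (fun t => t.2.2.2.1)) + 1 ∧
      0 ≤ s.2.2.2.2.1 ∧ s.2.2.2.2.1 < pvPyMax (seats.map (fun t => t.2.2.2.2.1)) + 1 := by
    intro s hs
    obtain ⟨h1, h2⟩ := hpos s hs
    have hr : s.2.2.2.1 ≤ pvPyMax (seats.map (fun t => t.2.2.2.1)) :=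
      pv_le_pyMax (List.mem_map_of_mem hs)
    have hcm : s.2.2.2.2.1 ≤ pvPyMax (seats.map (fun t => t.2.2.2.2.1)) :=
      pv_le_pyMax (List.mem_map_of_mem hs)
    exact ⟨h1, by omega, h2, by omega⟩
  show create_seat_matrix seats = create_seat_matrix_alt seats
  simp only [create_seat_matrix, create_seat_matrix_alt, pvBuildRow, pvCellOfRow,
    pv_find?_filter]
  rw [pv_init_grid, pv_scatter_gather _ _ seats (fun _ _ => "") H]
  unfold pvGrid
  apply List.map_congr_left
  intro r _
  apply List.map_congr_left
  intro c _
  have hpred : (fun s : Int × Int × String × Int × Int × String =>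
      s.2.2.2.1 == r && s.2.2.2.2.1 == c)
    = (fun s : Int × Int × String × Int × Int × String =>
      (s.2.2.2.1 == r) && (s.2.2.2.2.1 == c)) := rfl
  rw [hpred]

theorem create_seat_matrix_changed : Claim_changed_create_seat_matrix := by
  unfold Claim_changed_create_seat_matrix; decide
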